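-- pv_equiv track=rewrite | github.com/sacadena/adventofcode2021 | day18.py | ind_large_regular_number
-- ===== SOURCE A (Python) =====
-- def ind_large_regular_number(x):
--     len_num = 2
--     res = ""
--     for idx in range(len(x) - len_num + 1):
--         is_num = True
--         for j in range(len_num):
--             is_num = is_num & x[idx + j].isdigit()
--
--         if is_num :
--             return idx
--     return None
-- ===== SOURCE B (Python) =====
-- def ind_large_regular_number(x):
--     digits = [i for i, ch in enumerate(x) if ch.isdigit()]
--     for a, b in zip(digits, digits[1:]):
--         if b == a + 1:
--             return a
--     return None
-- ===== Notes on version B (the rewrite author's own statement) =====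
-- stated objective: faster
-- what changed: Instead of re-checking a 2-wide window with an inner range(2) flag loop at every position, B builds the list of digit positions once and scans consecutive pairs of that list for a gap of 1 (constant-factor win: no inner loop, no per-position indexing).
import Mathlib
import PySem

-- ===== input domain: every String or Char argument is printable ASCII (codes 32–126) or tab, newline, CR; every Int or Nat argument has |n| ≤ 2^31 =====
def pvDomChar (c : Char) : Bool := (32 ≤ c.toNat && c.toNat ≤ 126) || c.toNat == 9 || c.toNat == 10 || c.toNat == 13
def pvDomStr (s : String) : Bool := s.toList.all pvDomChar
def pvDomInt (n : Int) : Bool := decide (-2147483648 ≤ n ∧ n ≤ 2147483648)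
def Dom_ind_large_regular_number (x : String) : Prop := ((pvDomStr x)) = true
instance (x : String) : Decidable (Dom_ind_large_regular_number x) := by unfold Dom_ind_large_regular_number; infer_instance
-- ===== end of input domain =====

-- B replaces A's per-position window re-check (inner range(2) flag loop) by building the
-- list of digit positions once and scanning consecutive pairs of it; objective: alternative.

-- ===== PORT A =====
-- the outer `for idx in range(len(x) - 2 + 1)` loop with its inner range(2) isdigit fold
def pvALoopA (cs : List Char) : List Int → Option Int
  | [] => none
  | idx :: rest =>
    let is_num := (PySem.List.pyRange 0 2 1).foldl
      (fun acc j => acc && (match PySem.List.pyGet? cs (idx + j) with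
        | some c => PySem.Chars.isdigit c
        | none => false)) true
    if is_num then some idx else pvALoopA cs rest

def ind_large_regular_number (x : String) : Option Int :=
  pvALoopA x.toList (PySem.List.pyRange 0 ((PySem.Str.len x) - 2 + 1) 1)

-- ===== PORT B =====
-- the `for a, b in zip(digits, digits[1:])` loop
def pvPairLoop : List (Int × Int) → Option Int
  | [] => none
  | (a, b) :: rest => if b == a + 1 then some a else pvPairLoop rest

def ind_large_regular_number_alt (x : String) : Option Int :=
  let digits := (PySem.List.enumerate x.toList 0).filterMap
    (fun p => if PySem.Chars.isdigit p.2 then some p.1 else none)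
  pvPairLoop (digits.zip (PySem.List.slice digits (some 1) none))

-- ===== PRECONDITION & SPEC =====
def Spec_ind_large_regular_number (x : String) (out : Option Int) : Prop := out = ind_large_regular_number_alt x
instance (x : String) (out : Option Int) : Decidable (Spec_ind_large_regular_number x out) := by unfold Spec_ind_large_regular_number; infer_instance

-- ===== CLAIM (what is proved, stated in full; the proofs are below) =====
def Claim_equal_ind_large_regular_number : Prop := ∀ (x : String), Dom_ind_large_regular_number x → Spec_ind_large_regular_number x (ind_large_regular_number x)

-- ===== LEMMAS AND PROOFS =====

-- the digit-position list of cs, positions starting at k (B's `digits` with offset)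
def pvDig (cs : List Char) (k : Int) : List Int :=
  (PySem.List.enumerate cs k).filterMap (fun p => if PySem.Chars.isdigit p.2 then some p.1 else none)

-- common reference: first position of two adjacent digits, scanning cs with absolute offset k
def pvSpec : List Char → Int → Option Int
  | [], _ => none
  | [_], _ => none
  | c1 :: c2 :: t, k =>
    if PySem.Chars.isdigit c1 && PySem.Chars.isdigit c2 then some k
    else pvSpec (c2 :: t) (k + 1)

lemma pvDig_nil (k : Int) : pvDig [] k = [] := rfl

lemma pvDig_cons (c : Char) (cs : List Char) (k : Int) :
    pvDig (c :: cs) k =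
      if PySem.Chars.isdigit c then k :: pvDig cs (k + 1) else pvDig cs (k + 1) := by
  by_cases h : PySem.Chars.isdigit c
  · simp [pvDig, PySem.List.enumerate_cons, h]
  · simp [pvDig, PySem.List.enumerate_cons, h]

lemma pvDig_mem_le (cs : List Char) (k m : Int) (h : m ∈ pvDig cs k) : k ≤ m := by
  induction cs generalizing k with
  | nil => simp [pvDig_nil] at h
  | cons c t ih =>
    rw [pvDig_cons] at h
    split at h
    · rcases List.mem_cons.mp h with h | h
      · omega
      · have := ih (k + 1) h; omega
    · have := ih (k + 1) h; omega

lemma pvSpec_short (cs : List Char) (k : Int) (h : cs.length ≤ 1) : pvSpec cs k = none := by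
  match cs with
  | [] => rfl
  | [_] => rfl
  | _ :: _ :: _ => simp at h

-- skipping a leading position that is not adjacent to the next one
lemma pvPairLoop_cons_skip (k : Int) (L : List Int) (h : ∀ m ∈ L, k + 1 < m) :
    pvPairLoop ((k :: L).zip ((k :: L).drop 1)) = pvPairLoop (L.zip (L.drop 1)) := by
  match L with
  | [] => rfl
  | b :: L' =>
    have hb : k + 1 < b := h b (by simp)
    simp only [List.drop_one, List.tail_cons, List.zip_cons_cons, pvPairLoop]
    rw [if_neg (by simp; omega)]

-- B equals the reference
lemma pvB_eq_spec (cs : List Char) (k : Int) :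
    pvPairLoop ((pvDig cs k).zip ((pvDig cs k).drop 1)) = pvSpec cs k := by
  induction cs generalizing k with
  | nil => rfl
  | cons c1 rest ih =>
    match rest with
    | [] =>
      rw [pvDig_cons]
      split <;> simp [pvDig_nil, pvPairLoop, pvSpec]
    | c2 :: t =>
      by_cases h1 : PySem.Chars.isdigit c1
      · rw [pvDig_cons, if_pos h1, pvDig_cons]
        by_cases h2 : PySem.Chars.isdigit c2
        · rw [if_pos h2]
          simp [pvPairLoop, pvSpec, h1, h2]
        · rw [if_neg h2]
          have hskip := pvPairLoop_cons_skip k (pvDig t (k + 1 + 1))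
            (fun m hm => by have := pvDig_mem_le t (k + 1 + 1) m hm; omega)
          rw [hskip]
          have hD : pvDig (c2 :: t) (k + 1) = pvDig t (k + 1 + 1) := by
            rw [pvDig_cons, if_neg h2]
          have := ih (k + 1)
          rw [hD] at this
          rw [this]
          simp [pvSpec, h1, h2]
      · rw [pvDig_cons, if_neg h1]
        have hD : pvDig (c2 :: t) (k + 1) = pvDig (c1 :: c2 :: t) k := by
          rw [pvDig_cons (c := c1), if_neg h1]
        rw [← hD] at *
        rw [ih (k + 1)]
        simp [pvSpec, h1]

-- A equals the reference
lemma pvA_eq_spec (cs : List Char) (n : Nat) :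
    ∀ i : Nat, cs.length - i ≤ n →
      pvALoopA cs (PySem.List.pyRange (i : Int) ((cs.length : Int) - 2 + 1) 1) =
        pvSpec (cs.drop i) (i : Int) := by
  induction n with
  | zero =>
    intro i hi
    rw [PySem.List.pyRange_one_eq_nil (by omega)]
    rw [List.drop_of_length_le (by omega)]
    rfl
  | succ n ih =>
    intro i hi
    by_cases hend : (cs.length : Int) - 2 + 1 ≤ (i : Int)
    · rw [PySem.List.pyRange_one_eq_nil hend]
      rw [pvSpec_short _ _ (by simp; omega)]
      rfl
    · have hi1 : i + 1 < cs.length := by omega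
      have hi0 : i < cs.length := by omega
      rw [PySem.List.pyRange_one_cons (by omega)]
      show (if _ then _ else _) = _
      have hg0 : PySem.List.pyGet? cs ((i : Int) + 0) = some cs[i] := by
        rw [add_zero]
        simp [PySem.List.pyGet?_natCast, List.getElem?_eq_getElem hi0]
      have hg1 : PySem.List.pyGet? cs ((i : Int) + 1) = some cs[i + 1] := by
        have : ((i : Int) + 1) = ((i + 1 : Nat) : Int) := by push_cast; ring
        rw [this, PySem.List.pyGet?_natCast]
        simp [List.getElem?_eq_getElem hi1]
      have hrange2 : PySem.List.pyRange 0 2 1 = [0, 1] := by decide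
      rw [hrange2]
      simp only [List.foldl_cons, List.foldl_nil, hg0, hg1, Bool.true_and]
      rw [List.drop_eq_getElem_cons hi0, List.drop_eq_getElem_cons hi1]
      show (if PySem.Chars.isdigit cs[i] && PySem.Chars.isdigit cs[i + 1] then some (i : Int)
            else pvALoopA cs (PySem.List.pyRange ((i : Int) + 1) ((cs.length : Int) - 2 + 1) 1)) = _
      by_cases hd : PySem.Chars.isdigit cs[i] && PySem.Chars.isdigit cs[i + 1]
      · rw [if_pos hd]
        rw [pvSpec, if_pos hd]
      · rw [if_neg hd]
        rw [pvSpec, if_neg hd]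
        have hcast : ((i : Int) + 1) = ((i + 1 : Nat) : Int) := by push_cast; ring
        rw [hcast]
        have := ih (i + 1) (by omega)
        rw [this]
        rw [← List.drop_eq_getElem_cons hi1]

lemma pv_slice_one (L : List Int) : PySem.List.slice L (some 1) none = L.drop 1 := by
  simp [pysem]

-- ===== VERDICT (by name: the statement is the Claim_ definition above) =====
theorem ind_large_regular_number_spec : Claim_equal_ind_large_regular_number := by
  intro x _
  unfold Spec_ind_large_regular_number ind_large_regular_number ind_large_regular_number_alt
  have hA := pvA_eq_spec x.toList x.toList.length 0 (by omega)
  simp only [Nat.cast_zero, List.drop_zero] at hA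
  have hlen : PySem.Str.len x = (x.toList.length : Int) := by simp [PySem.Str.len_eq]
  rw [hlen, hA]
  show pvSpec x.toList 0 = pvPairLoop ((pvDig x.toList 0).zip (PySem.List.slice (pvDig x.toList 0) (some 1) none))
  rw [pv_slice_one, pvB_eq_spec]
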